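-- pv_equiv track=rewrite | github.com/NaveenSilvester/PythonMegaCourse | Section-12/passwordStrengthV2.py | generate_password_signature
-- ===== SOURCE A (Python) =====
-- def generate_password_signature(password):
--     signature = []
--     num_char = sum([ char.isalpha() for char in password  ])
--     num_upperchar = sum([ char.isupper() for char in password  ])
--
--     num_digit = sum([char.isdigit() for char in password])
--
--     num_nonalphanumeric = [char.isalnum() for char in password]
--
--     len_pw = len(password)
--
--     num_nonnc = (len_pw - sum(num_nonalphanumeric))
--
--     signature.append(len_pw)
--     signature.append(num_char)
--     signature.append(num_upperchar)
--     signature.append(num_digit)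
--     signature.append(num_nonnc)
--     return (signature)
-- ===== SOURCE B (Python) =====
-- def generate_password_signature(password):
--     # Partition characters into four *disjoint* classes (Upper/Lower/Digit/Other)
--     # with one counting dict, then derive the overlapping counts arithmetically:
--     # alpha = U + L, non-alphanumeric = O (since U+L+D+O = len).
--     def classify(c):
--         if 'A' <= c <= 'Z':
--             return 'U'
--         if 'a' <= c <= 'z':
--             return 'L'
--         if '0' <= c <= '9':
--             return 'D'
--         return 'O'
--     counts = {}
--     for c in password:
--         k = classify(c)
--         counts[k] = counts.get(k, 0) + 1
--     u = counts.get('U', 0)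
--     low = counts.get('L', 0)
--     d = counts.get('D', 0)
--     o = counts.get('O', 0)
--     return [len(password), u + low, u, d, o]
-- ===== Notes on version B (the rewrite author's own statement) =====
-- stated objective: alternative
-- what changed: Instead of summing five overlapping per-character predicate lists, B partitions each character into one of four disjoint classes (upper/lower/digit/other) with a single counting dict and derives the signature arithmetically (alpha = upper+lower, non-alnum = other).
import Mathlib
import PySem

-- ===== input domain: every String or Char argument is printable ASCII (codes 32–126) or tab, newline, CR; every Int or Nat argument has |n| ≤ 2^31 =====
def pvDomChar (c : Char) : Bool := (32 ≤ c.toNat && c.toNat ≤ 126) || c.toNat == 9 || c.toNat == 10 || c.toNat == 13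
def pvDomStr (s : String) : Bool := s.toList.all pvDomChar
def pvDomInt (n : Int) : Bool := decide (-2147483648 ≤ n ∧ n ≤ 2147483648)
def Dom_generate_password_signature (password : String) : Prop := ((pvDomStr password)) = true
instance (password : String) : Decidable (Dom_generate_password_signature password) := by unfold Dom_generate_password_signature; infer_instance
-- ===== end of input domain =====

-- B partitions characters into four disjoint classes counted in one dict and derives the
-- overlapping counts arithmetically, instead of A's five overlapping predicate sums (alternative).

-- ===== PORT A =====
-- A builds four separate per-character lists/sums, then assembles the signature by appends.
def generate_password_signature (password : String) : List Int :=
  let signature : List Int := []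
  let num_char : Int :=
    ((password.toList.map (fun c => PySem.Chars.isalpha c)).map (fun b => if b then (1:Int) else 0)).sum
  let num_upperchar : Int :=
    ((password.toList.map (fun c => PySem.Chars.isupper c)).map (fun b => if b then (1:Int) else 0)).sum
  let num_digit : Int :=
    ((password.toList.map (fun c => PySem.Chars.isdigit c)).map (fun b => if b then (1:Int) else 0)).sum
  let num_nonalphanumeric : List Bool := password.toList.map (fun c => PySem.Chars.isalnum c)
  let len_pw : Int := PySem.Str.len password
  let num_nonnc : Int := len_pw - (num_nonalphanumeric.map (fun b => if b then (1:Int) else 0)).sum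
  let signature := signature ++ [len_pw]
  let signature := signature ++ [num_char]
  let signature := signature ++ [num_upperchar]
  let signature := signature ++ [num_digit]
  let signature := signature ++ [num_nonnc]
  signature

-- ===== PORT B =====
-- Source B's inner classify: the disjoint class ('U'/'L'/'D'/'O') of a character
def pvClassify (c : Char) : Char :=
  if 'A' ≤ c ∧ c ≤ 'Z' then 'U'
  else if 'a' ≤ c ∧ c ≤ 'z' then 'L'
  else if '0' ≤ c ∧ c ≤ '9' then 'D'
  else 'O'

-- one counting dict over the disjoint classes, signature derived from the four class counts
def generate_password_signature_alt (password : String) : List Int :=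
  let counts : PySem.Dict Char Int :=
    password.toList.foldl
      (fun d c => d.insert (pvClassify c) (d.getD (pvClassify c) 0 + 1)) PySem.Dict.empty
  let u : Int := counts.getD 'U' 0
  let low : Int := counts.getD 'L' 0
  let dg : Int := counts.getD 'D' 0
  let o : Int := counts.getD 'O' 0
  [PySem.Str.len password, u + low, u, dg, o]

-- ===== PRECONDITION & SPEC =====
def Spec_generate_password_signature (password : String) (out : List Int) : Prop := out = generate_password_signature_alt password
instance (password : String) (out : List Int) : Decidable (Spec_generate_password_signature password out) := by unfold Spec_generate_password_signature; infer_instance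

-- ===== CLAIM (what is proved, stated in full; the proofs are below) =====
def Claim_equal_generate_password_signature : Prop := ∀ (password : String), Dom_generate_password_signature password → Spec_generate_password_signature password (generate_password_signature password)

-- ===== LEMMAS AND PROOFS =====

-- A-side indicator sum of a boolean predicate
def pvSumB (p : Char → Bool) (l : List Char) : Int :=
  ((l.map p).map (fun b => if b then (1:Int) else 0)).sum

-- per-character: the disjoint class of c determines each of A's indicator values
theorem pv_char (c : Char) :
    ((if PySem.Chars.isupper c then (1:Int) else 0) = (if 'U' = pvClassify c then 1 else 0))
  ∧ ((if PySem.Chars.isalpha c then (1:Int) else 0)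
       = (if 'U' = pvClassify c then 1 else 0) + (if 'L' = pvClassify c then 1 else 0))
  ∧ ((if PySem.Chars.isdigit c then (1:Int) else 0) = (if 'D' = pvClassify c then 1 else 0))
  ∧ ((if PySem.Chars.isalnum c then (1:Int) else 0)
       = (if 'U' = pvClassify c then 1 else 0) + (if 'L' = pvClassify c then 1 else 0)
         + (if 'D' = pvClassify c then 1 else 0)) := by
  by_cases hU : 'A' ≤ c ∧ c ≤ 'Z'
  · have h9 : ¬ c ≤ '9' := fun h => absurd (le_trans hU.1 h) (by decide)
    simp [pvClassify, PySem.Chars.isalnum, PySem.Chars.isalpha, PySem.Chars.isupper,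
      PySem.Chars.isdigit, hU.1, hU.2, h9]
  · by_cases hL : 'a' ≤ c ∧ c ≤ 'z'
    · have h9 : ¬ c ≤ '9' := fun h => absurd (le_trans hL.1 h) (by decide)
      simp [pvClassify, PySem.Chars.isalnum, PySem.Chars.isalpha, PySem.Chars.isupper,
        PySem.Chars.islower, PySem.Chars.isdigit, hU, hL, h9]
    · by_cases hD : '0' ≤ c ∧ c ≤ '9'
      · simp [pvClassify, PySem.Chars.isalnum, PySem.Chars.isalpha, PySem.Chars.isupper,
          PySem.Chars.islower, PySem.Chars.isdigit, hU, hL, hD]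
      · simp [pvClassify, PySem.Chars.isalnum, PySem.Chars.isalpha, PySem.Chars.isupper,
          PySem.Chars.islower, PySem.Chars.isdigit, hU, hL, hD]

-- the class counts of the partition determine all of A's overlapping sums
theorem pv_counts (l : List Char) :
    (((l.map pvClassify).count 'U' : Int) = pvSumB PySem.Chars.isupper l)
  ∧ (((l.map pvClassify).count 'U' : Int) + ((l.map pvClassify).count 'L' : Int)
       = pvSumB PySem.Chars.isalpha l)
  ∧ (((l.map pvClassify).count 'D' : Int) = pvSumB PySem.Chars.isdigit l)
  ∧ ((l.length : Int) - pvSumB PySem.Chars.isalnum l = ((l.map pvClassify).count 'O' : Int)) := by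
  induction l with
  | nil => simp [pvSumB]
  | cons c cs ih =>
    obtain ⟨h1, h2, h3, h4⟩ := ih
    obtain ⟨e1, e2, e3, e4⟩ := pv_char c
    have hcl : pvClassify c = 'U' ∨ pvClassify c = 'L' ∨ pvClassify c = 'D' ∨
        pvClassify c = 'O' := by unfold pvClassify; split_ifs <;> simp
    simp only [pvSumB, List.map_cons, List.sum_cons, List.count_cons, List.length_cons,
      beq_iff_eq] at h1 h2 h3 h4 ⊢
    rw [e1, e2, e3, e4]
    rcases hcl with h | h | h | h <;> simp only [h, reduceIte] <;> push_cast <;> omega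

theorem generate_password_signature_spec : Claim_equal_generate_password_signature := by
  intro password _
  unfold Spec_generate_password_signature generate_password_signature generate_password_signature_alt
  have hfold :
      password.toList.foldl
        (fun (d : PySem.Dict Char Int) c =>
          d.insert (pvClassify c) (d.getD (pvClassify c) 0 + 1)) PySem.Dict.empty
      = PySem.Dict.counter (password.toList.map pvClassify) := by
    rw [← PySem.Dict.foldl_insert_getD_add_one_eq_counter, List.foldl_map]
  obtain ⟨h1, h2, h3, h4⟩ := pv_counts password.toList
  simp only [pvSumB, List.map_map, Function.comp_def] at h1 h2 h3 h4
  have hlen : (password.length : Int) = (password.toList.length : Int) := by simp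
  simp [hfold, PySem.Dict.getD_counter, PySem.Str.len,
    List.map_map, Function.comp_def, hlen, h1, ← h2, h3, ← h4]
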